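-- pv_equiv track=rewrite | github.com/caika-lgtm/diffsan | scripts/generate_docs_home.py | _rewrite_for_docs_site
-- ===== SOURCE A (Python) =====
-- def _rewrite_for_docs_site(content: str) -> str:
--     replacements = {
--         "docs/images/": "images/",
--         "(CONTRIBUTING.md)": "(contributing.md)",
--         "(LICENSE)": "(https://github.com/caika-lgtm/diffsan/blob/main/LICENSE)",
--     }
--     for source, target in replacements.items():
--         content = content.replace(source, target)
--     return content
-- ===== SOURCE B (Python) =====
-- def _rewrite_for_docs_site(content: str) -> str:
--     replacements = {
--         "docs/images/": "images/",
--         "(CONTRIBUTING.md)": "(contributing.md)",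
--         "(LICENSE)": "(https://github.com/caika-lgtm/diffsan/blob/main/LICENSE)",
--     }
--     out = []
--     i = 0
--     n = len(content)
--     while i < n:
--         for src, tgt in replacements.items():
--             if content.startswith(src, i):
--                 out.append(tgt)
--                 i += len(src)
--                 break
--         else:
--             out.append(content[i])
--             i += 1
--     return "".join(out)
-- ===== Notes on version B (the rewrite author's own statement) =====
-- stated objective: alternative
-- what changed: A runs three separate full-string replace passes (one per mapping entry); B makes a single left-to-right scan over the string, dispatching at each position on whichever source key matches (in dict order) and emitting its target, building the output once.
import Mathlib
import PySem

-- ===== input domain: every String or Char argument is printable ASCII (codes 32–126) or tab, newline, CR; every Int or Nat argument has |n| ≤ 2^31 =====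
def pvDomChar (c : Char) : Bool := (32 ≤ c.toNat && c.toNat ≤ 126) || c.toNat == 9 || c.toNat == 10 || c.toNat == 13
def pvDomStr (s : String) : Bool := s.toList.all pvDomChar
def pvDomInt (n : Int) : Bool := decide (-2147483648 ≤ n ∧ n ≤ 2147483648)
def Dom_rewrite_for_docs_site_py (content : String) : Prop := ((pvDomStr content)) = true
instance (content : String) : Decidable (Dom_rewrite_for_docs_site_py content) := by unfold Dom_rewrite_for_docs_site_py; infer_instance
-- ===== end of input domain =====

set_option maxRecDepth 8000
set_option maxHeartbeats 1000000


-- B replaces A's three sequential full-string replace passes by one left-to-right scan that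
-- dispatches on whichever source key matches at each position (objective: alternative single-pass algorithm).

-- ===== PORT A =====
def rewrite_for_docs_site_py (content : String) : String :=
  (((PySem.Dict.empty.insert "docs/images/" "images/").insert
        "(CONTRIBUTING.md)" "(contributing.md)").insert
      "(LICENSE)" "(https://github.com/caika-lgtm/diffsan/blob/main/LICENSE)" :
    PySem.Dict String String).items.foldl (fun c st => PySem.Str.replace c st.1 st.2) content

-- ===== PORT B =====
-- the while-loop of Source B: at each position try the dict entries in order; on a match emit the
-- target and skip the source's length, otherwise copy one character
def pvAltScan (items : List (String × String)) : List Char → List Char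
  | [] => []
  | c :: t =>
    match items.find? (fun st => st.1.toList.isPrefixOf (c :: t)) with
    | some st => st.2.toList ++ pvAltScan items (List.drop (st.1.toList.length - 1) t)
    | none => c :: pvAltScan items t
termination_by l => l.length
decreasing_by
  all_goals simp only [List.length_drop, List.length_cons]
  all_goals omega

def rewrite_for_docs_site_py_alt (content : String) : String :=
  String.ofList (pvAltScan
    (((PySem.Dict.empty.insert "docs/images/" "images/").insert
        "(CONTRIBUTING.md)" "(contributing.md)").insert
      "(LICENSE)" "(https://github.com/caika-lgtm/diffsan/blob/main/LICENSE)" :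
      PySem.Dict String String).items content.toList)

-- ===== PRECONDITION & SPEC =====
def Spec_rewrite_for_docs_site_py (content : String) (out : String) : Prop := out = rewrite_for_docs_site_py_alt content
instance (content : String) (out : String) : Decidable (Spec_rewrite_for_docs_site_py content out) := by unfold Spec_rewrite_for_docs_site_py; infer_instance

-- ===== CLAIM (what is proved, stated in full; the proofs are below) =====
def Claim_equal_rewrite_for_docs_site_py : Prop := ∀ (content : String), Dom_rewrite_for_docs_site_py content → Spec_rewrite_for_docs_site_py content (rewrite_for_docs_site_py content)

-- ===== LEMMAS AND PROOFS =====

-- the natural structural recursion computed by PySem.Chars.replace.go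
def pvRep (old new : List Char) : List Char → List Char
  | [] => []
  | c :: t =>
    if old.isPrefixOf (c :: t) then new ++ pvRep old new (List.drop (old.length - 1) t)
    else c :: pvRep old new t
termination_by l => l.length
decreasing_by
  all_goals simp only [List.length_drop, List.length_cons]
  all_goals omega

-- the concrete sources and targets, as char lists
def pvP1 : List Char := "docs/images/".toList
def pvN1 : List Char := "images/".toList
def pvP2 : List Char := "(CONTRIBUTING.md)".toList
def pvN2 : List Char := "(contributing.md)".toList
def pvP3 : List Char := "(LICENSE)".toList
def pvN3 : List Char := "(https://github.com/caika-lgtm/diffsan/blob/main/LICENSE)".toList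
def pvItems : List (String × String) :=
  [("docs/images/", "images/"), ("(CONTRIBUTING.md)", "(contributing.md)"),
   ("(LICENSE)", "(https://github.com/caika-lgtm/diffsan/blob/main/LICENSE)")]

lemma pvGo_eq (old new : List Char) (hold : old ≠ []) :
    ∀ (fuel : Nat) (l acc : List Char), l.length ≤ fuel →
      PySem.Chars.replace.go old new fuel l acc = acc.reverse ++ pvRep old new l := by
  intro fuel
  induction fuel with
  | zero =>
    intro l acc h
    have hl : l = [] := by cases l <;> simp_all
    subst hl; simp [PySem.Chars.replace.go, pvRep]
  | succ n ih =>
    intro l acc h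
    cases l with
    | nil => simp [PySem.Chars.replace.go, pvRep]
    | cons c t =>
      obtain ⟨o, ot, rfl⟩ : ∃ o ot, old = o :: ot := by
        cases old with | nil => exact absurd rfl hold | cons o ot => exact ⟨o, ot, rfl⟩
      have hdrop : List.drop (o :: ot).length (c :: t) = List.drop ((o :: ot).length - 1) t := by
        simp
      by_cases hp : (o :: ot).isPrefixOf (c :: t) = true
      · have hlen : (List.drop ((o :: ot).length - 1) t).length ≤ n := by
          simp only [List.length_drop]
          simp at h; omega
        simp only [PySem.Chars.replace.go, hp, if_true, hdrop]
        rw [ih _ _ hlen]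
        simp [pvRep, hp]
      · have hlen : t.length ≤ n := by simp at h; omega
        simp only [PySem.Chars.replace.go, hp, if_false, Bool.false_eq_true]
        rw [ih _ _ hlen]
        simp [pvRep, hp]

lemma pvReplace_eq (s old new : List Char) (hold : old ≠ []) :
    PySem.Chars.replace s old new = pvRep old new s := by
  unfold PySem.Chars.replace
  rw [if_neg (by simp [List.isEmpty_iff, hold])]
  rw [pvGo_eq old new hold s.length s [] le_rfl]
  simp

lemma pvRep_match (old new x : List Char) (hold : old ≠ []) :
    pvRep old new (old ++ x) = new ++ pvRep old new x := by
  obtain ⟨o, ot, rfl⟩ : ∃ o ot, old = o :: ot := by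
    cases old with | nil => exact absurd rfl hold | cons o ot => exact ⟨o, ot, rfl⟩
  have hp : (o :: ot).isPrefixOf ((o :: ot) ++ x) = true := by
    rw [List.isPrefixOf_iff_prefix]; exact List.prefix_append _ _
  rw [List.cons_append]
  rw [pvRep]
  rw [if_pos (by rw [← List.cons_append]; exact hp)]
  simp [List.drop_left' (by simp : (ot).length = ot.length)]

lemma pvRep_pass (old new : List Char) :
    ∀ (a : List Char), (∀ s ∈ a.tails, s ≠ [] → ¬ old <+: s ∧ ¬ s <+: old) →
      ∀ y, pvRep old new (a ++ y) = a ++ pvRep old new y := by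
  intro a
  induction a with
  | nil => simp
  | cons c a' ih =>
    intro h y
    have hne : ¬ old.isPrefixOf ((c :: a') ++ y) = true := by
      rw [List.isPrefixOf_iff_prefix]
      intro hpre
      have h1 : (c :: a') <+: (c :: a') ++ y := List.prefix_append _ _
      have hs : (c :: a') ∈ (c :: a').tails := by simp [List.mem_tails]
      rcases List.prefix_or_prefix_of_prefix hpre h1 with h2 | h2
      · exact (h _ hs (by simp)).1 h2
      · exact (h _ hs (by simp)).2 h2
    rw [List.cons_append, pvRep, if_neg (by rw [← List.cons_append]; exact hne)]
    have h' : ∀ s ∈ a'.tails, s ≠ [] → ¬ old <+: s ∧ ¬ s <+: old := by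
      intro s hs hne'
      exact h s (by simp only [List.mem_tails] at hs ⊢; exact hs.trans (List.suffix_cons _ _)) hne'
    rw [ih h' y, List.cons_append]

-- a nonempty suffix s of pat's tail is a prefix of `pvRep old new t` iff it is a prefix of t,
-- provided new's head avoids pat's tail characters and pat's tail suffixes are prefix-incomparable with old
lemma pvRep_prefix_tail (old : List Char) (n₀ : Char) (nt : List Char) (pat : List Char)
    (h1 : ∀ c ∈ List.drop 1 pat, c ≠ n₀)
    (h2 : ∀ s ∈ (List.drop 1 pat).tails, s ≠ [] → ¬ s <+: old ∧ ¬ old <+: s) :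
    ∀ (t : List Char), ∀ s ∈ (List.drop 1 pat).tails,
      (s <+: pvRep old (n₀ :: nt) t ↔ s <+: t) := by
  intro t
  induction t with
  | nil => intro s hs; simp [pvRep]
  | cons c t' ih =>
    intro s hs
    cases s with
    | nil => simp
    | cons d s' =>
      have hssuf : (d :: s') <:+ List.drop 1 pat := (List.mem_tails _ _).mp hs
      by_cases hp : old.isPrefixOf (c :: t') = true
      · have hpre : old <+: (c :: t') := List.isPrefixOf_iff_prefix.mp hp
        rw [pvRep, if_pos hp]
        constructor
        · intro hsp
          exfalso
          have hd : d = n₀ := by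
            rcases hsp with ⟨r, hr⟩
            simp [List.cons_append] at hr
            exact hr.1
          exact h1 d (hssuf.subset (by simp)) hd
        · intro hst
          exfalso
          rcases List.prefix_or_prefix_of_prefix hst hpre with h' | h'
          · exact (h2 _ hs (by simp)).1 h'
          · exact (h2 _ hs (by simp)).2 h'
      · rw [pvRep, if_neg hp]
        have hs' : s' ∈ (List.drop 1 pat).tails := by
          rw [List.mem_tails]
          exact (List.suffix_cons d s').trans hssuf
        constructor
        · intro hsp
          rw [List.cons_prefix_cons] at hsp ⊢
          exact ⟨hsp.1, (ih s' hs').mp hsp.2⟩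
        · intro hst
          rw [List.cons_prefix_cons] at hst ⊢
          exact ⟨hst.1, (ih s' hs').mpr hst.2⟩

lemma pvRep_prefix_iff (old : List Char) (n₀ : Char) (nt : List Char) (p₀ : Char) (pt : List Char)
    (h1 : ∀ c ∈ pt, c ≠ n₀)
    (h2 : ∀ s ∈ pt.tails, s ≠ [] → ¬ s <+: old ∧ ¬ old <+: s)
    (h3 : ¬ (p₀ :: pt) <+: (n₀ :: nt) ∧ ¬ (n₀ :: nt) <+: (p₀ :: pt))
    (h4 : ¬ (p₀ :: pt) <+: old ∧ ¬ old <+: (p₀ :: pt)) :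
    ∀ l, ((p₀ :: pt) <+: pvRep old (n₀ :: nt) l ↔ (p₀ :: pt) <+: l) := by
  intro l
  have hdrop : List.drop 1 (p₀ :: pt) = pt := by simp
  cases l with
  | nil => simp [pvRep]
  | cons c t =>
    by_cases hp : old.isPrefixOf (c :: t) = true
    · have hpre : old <+: (c :: t) := List.isPrefixOf_iff_prefix.mp hp
      rw [pvRep, if_pos hp]
      constructor
      · intro hsp
        exfalso
        have hnp : (n₀ :: nt) <+: (n₀ :: nt) ++ pvRep old (n₀ :: nt) (List.drop (old.length - 1) t) :=
          List.prefix_append _ _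
        rcases List.prefix_or_prefix_of_prefix hsp hnp with h' | h'
        · exact h3.1 h'
        · exact h3.2 h'
      · intro hst
        exfalso
        rcases List.prefix_or_prefix_of_prefix hst hpre with h' | h'
        · exact h4.1 h'
        · exact h4.2 h'
    · rw [pvRep, if_neg hp]
      rw [List.cons_prefix_cons, List.cons_prefix_cons]
      have := pvRep_prefix_tail old n₀ nt (p₀ :: pt) (by simpa [hdrop] using h1)
        (by simpa [hdrop] using h2) t pt (by simp [hdrop, List.mem_tails])
      rw [this]

-- decidable side conditions for the concrete patterns
lemma pvH_pass_N1_P2 : ∀ s ∈ pvN1.tails, s ≠ [] → ¬ pvP2 <+: s ∧ ¬ s <+: pvP2 := by decide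
lemma pvH_pass_N1_P3 : ∀ s ∈ pvN1.tails, s ≠ [] → ¬ pvP3 <+: s ∧ ¬ s <+: pvP3 := by decide
lemma pvH_pass_P2_P1 : ∀ s ∈ pvP2.tails, s ≠ [] → ¬ pvP1 <+: s ∧ ¬ s <+: pvP1 := by decide
lemma pvH_pass_N2_P3 : ∀ s ∈ pvN2.tails, s ≠ [] → ¬ pvP3 <+: s ∧ ¬ s <+: pvP3 := by decide
lemma pvH_pass_P3_P1 : ∀ s ∈ pvP3.tails, s ≠ [] → ¬ pvP1 <+: s ∧ ¬ s <+: pvP1 := by decide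
lemma pvH_pass_P3_P2 : ∀ s ∈ pvP3.tails, s ≠ [] → ¬ pvP2 <+: s ∧ ¬ s <+: pvP2 := by decide

lemma pvAllNe (l : List Char) (x : Char) (h : l.all (fun c => c != x) = true) :
    ∀ c ∈ l, c ≠ x := by simpa [List.all_eq_true] using h

-- unfolding lemmas for the single-pass scan on the concrete item list
lemma pvAlt_match1 (x : List Char) :
    pvAltScan pvItems (pvP1 ++ x) = pvN1 ++ pvAltScan pvItems x := by
  show pvAltScan pvItems ('d' :: ("ocs/images/".toList ++ x)) = _
  rw [pvAltScan]
  simp [pvItems, List.isPrefixOf, pvN1]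

lemma pvAlt_match2 (x : List Char) :
    pvAltScan pvItems (pvP2 ++ x) = pvN2 ++ pvAltScan pvItems x := by
  show pvAltScan pvItems ('(' :: ("CONTRIBUTING.md)".toList ++ x)) = _
  rw [pvAltScan]
  simp [pvItems, List.isPrefixOf, pvN2]

lemma pvAlt_match3 (x : List Char) :
    pvAltScan pvItems (pvP3 ++ x) = pvN3 ++ pvAltScan pvItems x := by
  show pvAltScan pvItems ('(' :: ("LICENSE)".toList ++ x)) = _
  rw [pvAltScan]
  simp [pvItems, List.isPrefixOf, pvN3]

lemma pvAlt_none (c : Char) (t : List Char)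
    (g1 : ¬ pvP1.isPrefixOf (c :: t) = true)
    (g2 : ¬ pvP2.isPrefixOf (c :: t) = true)
    (g3 : ¬ pvP3.isPrefixOf (c :: t) = true) :
    pvAltScan pvItems (c :: t) = c :: pvAltScan pvItems t := by
  rw [pvAltScan]
  have e : pvItems.find? (fun st => st.1.toList.isPrefixOf (c :: t)) = none := by
    simp only [pvItems]
    rw [List.find?_cons_of_neg (by exact g1), List.find?_cons_of_neg (by exact g2),
        List.find?_cons_of_neg (by exact g3), List.find?_nil]
  rw [e]

lemma pvMain : ∀ (l : List Char),
    pvRep pvP3 pvN3 (pvRep pvP2 pvN2 (pvRep pvP1 pvN1 l)) = pvAltScan pvItems l := by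
  have key : ∀ (n : Nat) (l : List Char), l.length ≤ n →
      pvRep pvP3 pvN3 (pvRep pvP2 pvN2 (pvRep pvP1 pvN1 l)) = pvAltScan pvItems l := by
    intro n
    induction n with
    | zero =>
      intro l h
      have hl : l = [] := by cases l <;> simp_all
      subst hl; simp [pvRep, pvAltScan]
    | succ n ih =>
      intro l hl
      by_cases h1 : pvP1.isPrefixOf l = true
      · obtain ⟨x, rfl⟩ := List.isPrefixOf_iff_prefix.mp h1
        have hx : x.length ≤ n := by
          simp only [List.length_append] at hl
          have : pvP1.length = 12 := by decide
          omega
        rw [pvRep_match pvP1 pvN1 x (by decide)]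
        rw [pvRep_pass pvP2 pvN2 pvN1 pvH_pass_N1_P2]
        rw [pvRep_pass pvP3 pvN3 pvN1 pvH_pass_N1_P3]
        rw [pvAlt_match1, ih x hx]
      · by_cases h2 : pvP2.isPrefixOf l = true
        · obtain ⟨x, rfl⟩ := List.isPrefixOf_iff_prefix.mp h2
          have hx : x.length ≤ n := by
            simp only [List.length_append] at hl
            have : pvP2.length = 17 := by decide
            omega
          rw [pvRep_pass pvP1 pvN1 pvP2 pvH_pass_P2_P1]
          rw [pvRep_match pvP2 pvN2 _ (by decide)]
          rw [pvRep_pass pvP3 pvN3 pvN2 pvH_pass_N2_P3]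
          rw [pvAlt_match2, ih x hx]
        · by_cases h3 : pvP3.isPrefixOf l = true
          · obtain ⟨x, rfl⟩ := List.isPrefixOf_iff_prefix.mp h3
            have hx : x.length ≤ n := by
              simp only [List.length_append] at hl
              have : pvP3.length = 9 := by decide
              omega
            rw [pvRep_pass pvP1 pvN1 pvP3 pvH_pass_P3_P1]
            rw [pvRep_pass pvP2 pvN2 pvP3 pvH_pass_P3_P2]
            rw [pvRep_match pvP3 pvN3 _ (by decide)]
            rw [pvAlt_match3, ih x hx]
          · cases l with
            | nil => simp [pvRep, pvAltScan]
            | cons c t =>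
              have ht : t.length ≤ n := by simp at hl; omega
              have e1 : pvRep pvP1 pvN1 (c :: t) = c :: pvRep pvP1 pvN1 t := by
                rw [pvRep, if_neg h1]
              have k2 : ¬ pvP2 <+: (c :: pvRep pvP1 pvN1 t) := by
                have hiff := pvRep_prefix_iff pvP1 'i' ("mages/".toList) '(' ("CONTRIBUTING.md)".toList)
                  (pvAllNe _ _ (by rfl)) (by decide) (by decide) (by decide) (c :: t)
                rw [show ('i' :: "mages/".toList) = pvN1 from by decide,
                    show ('(' :: "CONTRIBUTING.md)".toList) = pvP2 from by decide, e1] at hiff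
                rw [hiff]
                exact fun hc => h2 (List.isPrefixOf_iff_prefix.mpr hc)
              have e2 : pvRep pvP2 pvN2 (c :: pvRep pvP1 pvN1 t) =
                  c :: pvRep pvP2 pvN2 (pvRep pvP1 pvN1 t) := by
                rw [pvRep, if_neg (by rw [List.isPrefixOf_iff_prefix]; exact k2)]
              have k3 : ¬ pvP3 <+: (c :: pvRep pvP2 pvN2 (pvRep pvP1 pvN1 t)) := by
                have hiffA := pvRep_prefix_iff pvP2 '(' ("contributing.md)".toList) '(' ("LICENSE)".toList)
                  (pvAllNe _ _ (by rfl)) (by decide) (by decide) (by decide) (pvRep pvP1 pvN1 (c :: t))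
                have hiffB := pvRep_prefix_iff pvP1 'i' ("mages/".toList) '(' ("LICENSE)".toList)
                  (pvAllNe _ _ (by rfl)) (by decide) (by decide) (by decide) (c :: t)
                rw [show ('(' :: "contributing.md)".toList) = pvN2 from by decide,
                    show ('(' :: "LICENSE)".toList) = pvP3 from by decide] at hiffA
                rw [show ('i' :: "mages/".toList) = pvN1 from by decide,
                    show ('(' :: "LICENSE)".toList) = pvP3 from by decide, e1] at hiffB
                rw [e1, e2] at hiffA
                rw [hiffA, hiffB]
                exact fun hc => h3 (List.isPrefixOf_iff_prefix.mpr hc)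
              have e3 : pvRep pvP3 pvN3 (c :: pvRep pvP2 pvN2 (pvRep pvP1 pvN1 t)) =
                  c :: pvRep pvP3 pvN3 (pvRep pvP2 pvN2 (pvRep pvP1 pvN1 t)) := by
                rw [pvRep, if_neg (by rw [List.isPrefixOf_iff_prefix]; exact k3)]
              rw [e1, e2, e3, ih t ht, pvAlt_none c t h1 h2 h3]
  exact fun l => key l.length l le_rfl

lemma pvItems_eq :
    ((((PySem.Dict.empty.insert "docs/images/" "images/").insert
        "(CONTRIBUTING.md)" "(contributing.md)").insert
      "(LICENSE)" "(https://github.com/caika-lgtm/diffsan/blob/main/LICENSE)" :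
        PySem.Dict String String)).items = pvItems := by decide

-- ===== VERDICT (by name: the statement is the Claim_ definition above) =====
theorem rewrite_for_docs_site_py_spec : Claim_equal_rewrite_for_docs_site_py := by
  intro content _
  unfold Spec_rewrite_for_docs_site_py rewrite_for_docs_site_py rewrite_for_docs_site_py_alt
  rw [pvItems_eq]
  simp only [pvItems, List.foldl]
  rw [show (PySem.Str.replace (PySem.Str.replace (PySem.Str.replace content "docs/images/" "images/")
        "(CONTRIBUTING.md)" "(contributing.md)")
        "(LICENSE)" "(https://github.com/caika-lgtm/diffsan/blob/main/LICENSE)") =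
      String.ofList (PySem.Chars.replace
        (PySem.Chars.replace (PySem.Chars.replace content.toList pvP1 pvN1) pvP2 pvN2) pvP3 pvN3) from by
    simp [PySem.Str.replace, pvP1, pvN1, pvP2, pvN2, pvP3, pvN3]]
  rw [pvReplace_eq _ pvP1 pvN1 (by decide), pvReplace_eq _ pvP2 pvN2 (by decide),
      pvReplace_eq _ pvP3 pvN3 (by decide)]
  rw [pvMain]
  simp only [pvItems]
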